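-- pv_equiv track=rewrite | github.com/seskri2905/basics-python-programs | Dictionaries and Sets/Identify_duplicate_values.py | find_duplicate_values
-- ===== SOURCE A (Python) =====
-- def find_duplicate_values(d):
--     seen = set()
--     duplicates = set()
--
--     for value in d.values():
--         if value in seen:
--             duplicates.add(value)
--         else:
--             seen.add(value)
--
--     return duplicates
-- ===== SOURCE B (Python) =====
-- def find_duplicate_values(d):
--     # A value is a duplicate exactly when it has a second occurrence, i.e. at
--     # some position its prefix already contains exactly one earlier copy.
--     vals = list(d.values())
--     return {v for i, v in enumerate(vals) if vals[:i].count(v) == 1}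
-- ===== Notes on version B (the rewrite author's own statement) =====
-- stated objective: alternative
-- what changed: B replaces A's stateful single pass with two membership sets by a declarative set comprehension that selects each value at the position where its prefix contains exactly one earlier copy (prefix-count characterisation of second occurrences).
import Mathlib
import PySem

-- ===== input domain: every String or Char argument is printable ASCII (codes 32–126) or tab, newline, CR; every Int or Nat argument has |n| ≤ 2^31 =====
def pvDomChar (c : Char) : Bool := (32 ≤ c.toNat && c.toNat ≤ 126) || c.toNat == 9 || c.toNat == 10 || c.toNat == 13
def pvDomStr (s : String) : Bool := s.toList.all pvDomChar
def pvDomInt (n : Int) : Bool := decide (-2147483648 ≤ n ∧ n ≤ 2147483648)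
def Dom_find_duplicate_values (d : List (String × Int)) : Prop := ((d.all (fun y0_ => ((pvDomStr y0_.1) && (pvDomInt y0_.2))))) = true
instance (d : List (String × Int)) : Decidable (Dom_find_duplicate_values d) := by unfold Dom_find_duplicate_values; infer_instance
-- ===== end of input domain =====

-- B replaces A's two-membership-set pass by a declarative prefix-count set comprehension; same return value, no speed claim.


-- ===== PORT A =====
def find_duplicate_values (d : List (String × Int)) : List Int :=
  ((PySem.Dict.values (PySem.Dict.ofList d)).foldl
    (fun (st : PySem.Set Int × PySem.Set Int) value =>
      if PySem.Set.contains st.1 value then (st.1, PySem.Set.add st.2 value)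
      else (PySem.Set.add st.1 value, st.2))
    (PySem.Set.empty, PySem.Set.empty)).2

-- ===== PORT B =====
def find_duplicate_values_alt (d : List (String × Int)) : List Int :=
  PySem.Set.ofList ((PySem.List.enumerate (PySem.Dict.values (PySem.Dict.ofList d)) 0).filterMap
    (fun p => if PySem.List.count
        (PySem.List.slice (PySem.Dict.values (PySem.Dict.ofList d)) none (some p.1)) p.2 == 1
      then some p.2 else none))

-- ===== PRECONDITION & SPEC =====
def Spec_find_duplicate_values (d : List (String × Int)) (out : List Int) : Prop := out = find_duplicate_values_alt d
instance (d : List (String × Int)) (out : List Int) : Decidable (Spec_find_duplicate_values d out) := by unfold Spec_find_duplicate_values; infer_instance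

-- ===== CLAIM (what is proved, stated in full; the proofs are below) =====
def Claim_equal_find_duplicate_values : Prop := ∀ (d : List (String × Int)), Dom_find_duplicate_values d → Spec_find_duplicate_values d (find_duplicate_values d)

-- ===== LEMMAS AND PROOFS =====

-- The common value of both ports: the values at their SECOND occurrence while
-- scanning l with already-seen prefix `prev`.
def gDup : List Int → List Int → List Int
  | _, [] => []
  | prev, v :: l => (if prev.count v = 1 then [v] else []) ++ gDup (prev ++ [v]) l

theorem count_append_singleton (prev : List Int) (v w : Int) :
    (prev ++ [v]).count w = prev.count w + if w = v then 1 else 0 := by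
  rcases eq_or_ne w v with h | h
  · subst h; simp [List.count_append]
  · simp [List.count_append, List.count_singleton', h]
    exact fun hh => h hh.symm

theorem gDup_not_mem (l : List Int) : ∀ (prev : List Int) (v : Int),
    2 ≤ prev.count v → v ∉ gDup prev l := by
  induction l with
  | nil => intro prev v _ h; simp [gDup] at h
  | cons w l ih =>
    intro prev v hc h
    simp only [gDup, List.mem_append] at h
    rcases h with h | h
    · split at h
      · simp at h; subst h; omega
      · simp at h
    · refine ih (prev ++ [w]) v ?_ h
      rw [count_append_singleton]; omega

theorem gDup_nodup (l : List Int) : ∀ (prev : List Int), (gDup prev l).Nodup := by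
  induction l with
  | nil => intro prev; simp [gDup]
  | cons w l ih =>
    intro prev
    simp only [gDup]
    split
    · rename_i hc
      simp only [List.singleton_append, List.nodup_cons]
      refine ⟨gDup_not_mem l (prev ++ [w]) w ?_, ih _⟩
      rw [count_append_singleton, hc, if_pos rfl]
    · simpa using ih _

-- A's fold equals gDup, under the invariants the two accumulators maintain.
theorem foldA_eq_gDup (l : List Int) : ∀ (seen dups prev : List Int),
    (∀ w, w ∈ seen ↔ w ∈ prev) → (∀ w, w ∈ dups ↔ 2 ≤ prev.count w) →
    (l.foldl
      (fun (st : PySem.Set Int × PySem.Set Int) value =>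
        if PySem.Set.contains st.1 value then (st.1, PySem.Set.add st.2 value)
        else (PySem.Set.add st.1 value, st.2))
      (seen, dups)).2 = dups ++ gDup prev l := by
  induction l with
  | nil => intro seen dups prev _ _; simp [gDup]
  | cons v l ih =>
    intro seen dups prev hseen hdups
    simp only [List.foldl_cons, gDup]
    by_cases hv : v ∈ prev
    · have hcont : PySem.Set.contains seen v = true := by
        simp [PySem.Set.contains, hseen, hv]
      have hseen' : ∀ w, w ∈ seen ↔ w ∈ prev ++ [v] := by
        intro w
        rw [hseen w, List.mem_append, List.mem_singleton]
        exact ⟨fun h => Or.inl h, fun h => h.elim id (fun h => h ▸ hv)⟩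
      rw [if_pos hcont]
      by_cases h2 : 2 ≤ prev.count v
      · -- already a known duplicate: nothing changes
        have hmem : v ∈ dups := (hdups v).2 h2
        have hadd : PySem.Set.add dups v = dups := by
          simp [PySem.Set.add, PySem.Set.contains, hmem]
        have hc1 : ¬ prev.count v = 1 := by omega
        rw [hadd, if_neg hc1, List.nil_append]
        refine ih seen dups (prev ++ [v]) hseen' ?_
        intro w
        rw [hdups w, count_append_singleton]
        rcases eq_or_ne w v with h | h
        · subst h
          rw [if_pos rfl]
          exact ⟨fun _ => by omega, fun _ => h2⟩
        · simp [h]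
      · -- second occurrence: appended to dups, emitted by gDup
        have hc1 : prev.count v = 1 := by
          have : 1 ≤ prev.count v := List.one_le_count_iff.mpr hv
          omega
        have hnmem : v ∉ dups := fun h => h2 ((hdups v).1 h)
        have hadd : PySem.Set.add dups v = dups ++ [v] := by
          simp [PySem.Set.add, PySem.Set.contains, hnmem]
        rw [hadd, if_pos hc1]
        rw [ih seen (dups ++ [v]) (prev ++ [v]) hseen' ?_]
        · simp
        · intro w
          rw [List.mem_append, List.mem_singleton, hdups w, count_append_singleton]
          rcases eq_or_ne w v with h | h
          · subst h; simp [hc1]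
          · simp [h]
    · -- first occurrence: goes into seen only
      have hcont : ¬ PySem.Set.contains seen v = true := by
        simp [PySem.Set.contains, hseen, hv]
      have hc0 : prev.count v = 0 := List.count_eq_zero.mpr hv
      rw [if_neg hcont, if_neg (by omega), List.nil_append]
      refine ih (PySem.Set.add seen v) dups (prev ++ [v]) ?_ ?_
      · intro w
        rw [PySem.Set.mem_add, hseen w, List.mem_append, List.mem_singleton]
      · intro w
        rw [hdups w, count_append_singleton]
        rcases eq_or_ne w v with h | h
        · subst h; simp [hc0]
        · simp [h]

-- B's comprehension equals gDup.
theorem filterB_eq_gDup (l : List Int) : ∀ (prev : List Int),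
    ((PySem.List.enumerate l (prev.length : Int)).filterMap
      (fun p => if PySem.List.count (PySem.List.slice (prev ++ l) none (some p.1)) p.2 == 1
                then some p.2 else none)) = gDup prev l := by
  induction l with
  | nil => intro prev; simp [PySem.List.enumerate_nil, gDup]
  | cons v l ih =>
    intro prev
    rw [PySem.List.enumerate_cons, gDup]
    simp only [List.filterMap_cons]
    have hsl : PySem.List.slice (prev ++ v :: l) none (some (prev.length : Int)) = prev := by
      rw [PySem.List.slice_to_natCast]
      exact List.take_left
    have htail : ((prev.length : Int) + 1) = ((prev ++ [v]).length : Int) := by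
      simp
    have happ : prev ++ v :: l = (prev ++ [v]) ++ l := by simp
    rw [hsl, htail, happ]
    have := ih (prev ++ [v])
    by_cases hc : prev.count v = 1
    · rw [if_pos (by simpa [PySem.List.count_eq] using hc)]
      rw [this]; simp [hc]
    · rw [if_neg (by simpa [PySem.List.count_eq] using hc)]
      rw [this]; simp [hc]

theorem filterB_zero (l : List Int) :
    ((PySem.List.enumerate l 0).filterMap
      (fun p => if PySem.List.count (PySem.List.slice l none (some p.1)) p.2 == 1
                then some p.2 else none)) = gDup [] l := by
  simpa using filterB_eq_gDup l []

-- ===== VERDICT (by name: the statement is the Claim_ definition above) =====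
theorem find_duplicate_values_spec : Claim_equal_find_duplicate_values := by
  intro d _
  show find_duplicate_values d = find_duplicate_values_alt d
  unfold find_duplicate_values find_duplicate_values_alt
  rw [show (PySem.Set.empty : List Int) = [] from rfl, foldA_eq_gDup _ [] [] []
    (by intro w; simp) (by intro w; simp),
    filterB_zero, List.nil_append]
  exact (PySem.Set.ofList_eq_self_of_nodup _ (gDup_nodup _ [])).symm
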